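-- pv_equiv track=rewrite | github.com/vanluin/AdventOfCode | AdventOfCode/2022/12a2.py | getDirection
-- ===== SOURCE A (Python) =====
-- def getDirection(currentPosition, direction):
--     candidate = "-1,-1"
--     cury, curx = [int(a) for a in currentPosition.split(",")]
--     if direction == "up":
--         candidate = str(cury-1)+","+str(curx)
--     elif direction == "right":
--         candidate = str(cury)+","+str(curx+1)
--     elif direction == "down":
--         candidate = str(cury+1)+","+str(curx)
--     elif direction == "left":
--         candidate = str(cury)+","+str(curx-1)
--     return candidate
-- ===== SOURCE B (Python) =====
-- def getDirection(currentPosition, direction):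
--     cury, curx = [int(a) for a in currentPosition.split(",")]
--     dirs = ["up", "right", "down", "left"]
--     if direction not in dirs:
--         return "-1,-1"
--     # start at "up" = (-1, 0) and rotate 90 degrees clockwise once per step
--     # around the compass until the requested direction is reached
--     dy, dx = -1, 0
--     for _ in range(dirs.index(direction)):
--         dy, dx = dx, -dy
--     return str(cury + dy) + "," + str(curx + dx)
-- ===== Notes on version B (the rewrite author's own statement) =====
-- stated objective: alternative
-- what changed: Instead of four hardcoded branches each with its own offset, B derives the offset by starting from the 'up' vector (-1,0) and rotating it 90 degrees clockwise once per compass step up to the direction's position in the ordered compass list.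
import Mathlib
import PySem

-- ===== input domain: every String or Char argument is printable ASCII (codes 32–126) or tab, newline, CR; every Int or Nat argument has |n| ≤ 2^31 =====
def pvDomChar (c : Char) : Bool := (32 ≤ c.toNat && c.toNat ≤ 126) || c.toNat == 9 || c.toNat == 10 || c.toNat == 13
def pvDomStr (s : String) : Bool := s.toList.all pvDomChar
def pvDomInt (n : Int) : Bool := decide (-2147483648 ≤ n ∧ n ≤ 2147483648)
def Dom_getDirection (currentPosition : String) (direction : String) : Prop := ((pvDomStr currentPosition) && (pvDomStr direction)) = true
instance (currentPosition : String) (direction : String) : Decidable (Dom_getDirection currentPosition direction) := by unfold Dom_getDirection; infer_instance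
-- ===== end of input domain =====

-- B computes the offset by rotating the 'up' vector 90° clockwise along the ordered compass
-- list to the direction's index, instead of A's four hardcoded branches (alternative; same cost).

-- ===== PORT A =====
def getDirection (currentPosition : String) (direction : String) : String :=
  let candidate := "-1,-1"
  -- cury, curx = [int(a) for a in currentPosition.split(",")]; wrong part count or an
  -- unparsable part raises in Python and is excluded by Pre_.
  match (PySem.Str.split? currentPosition ",").getD [] with
  | [a, b] =>
    match PySem.Int.ofStr? a, PySem.Int.ofStr? b with
    | some cury, some curx =>
      if direction == "up" then PySem.Int.toStr (cury - 1) ++ "," ++ PySem.Int.toStr curx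
      else if direction == "right" then PySem.Int.toStr cury ++ "," ++ PySem.Int.toStr (curx + 1)
      else if direction == "down" then PySem.Int.toStr (cury + 1) ++ "," ++ PySem.Int.toStr curx
      else if direction == "left" then PySem.Int.toStr cury ++ "," ++ PySem.Int.toStr (curx - 1)
      else candidate
    | _, _ => candidate
  | _ => candidate

-- ===== PORT B =====
-- parse "y,x" into two ints (none = the inputs on which the Python raises; excluded by Pre_)
def pvParse2 (cp : String) : Option (Int × Int) :=
  let ps := (PySem.Str.split? cp ",").getD []
  if h : ps.length = 2 then
    (PySem.Int.ofStr? ps[0]).bind fun cury =>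
      (PySem.Int.ofStr? ps[1]).map fun curx => (cury, curx)
  else none

def pvCompass : List String := ["up", "right", "down", "left"]

def getDirection_alt (currentPosition : String) (direction : String) : String :=
  match pvParse2 currentPosition with
  | some (cury, curx) =>
    if pvCompass.contains direction then
      -- for _ in range(dirs.index(direction)): dy, dx = dx, -dy   starting from (-1, 0)
      let i := (PySem.List.index? pvCompass direction).getD 0
      let p := (List.range i).foldl (fun (q : Int × Int) _ => (q.2, -q.1)) (-1, 0)
      PySem.Int.toStr (cury + p.1) ++ "," ++ PySem.Int.toStr (curx + p.2)
    else "-1,-1"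
  | none => "-1,-1"

-- ===== PRECONDITION & SPEC =====
-- A raises (ValueError / unpacking error) unless currentPosition splits on "," into exactly two int()-parsable parts.
def Pre_getDirection (currentPosition : String) (direction : String) : Prop :=
  ((PySem.Str.split? currentPosition ",").getD []).length = 2 ∧
  ∀ p ∈ (PySem.Str.split? currentPosition ",").getD [], (PySem.Int.ofStr? p).isSome = true
instance (currentPosition : String) (direction : String) : Decidable (Pre_getDirection currentPosition direction) := by
  unfold Pre_getDirection; infer_instance

def pvWitness_getDirection : String × String := ("3,4", "up")

def Spec_getDirection (currentPosition : String) (direction : String) (out : String) : Prop := out = getDirection_alt currentPosition direction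
instance (currentPosition : String) (direction : String) (out : String) : Decidable (Spec_getDirection currentPosition direction out) := by unfold Spec_getDirection; infer_instance

-- ===== CLAIM (what is proved, stated in full; the proofs are below) =====
def Claim_equal_getDirection : Prop := ∀ (currentPosition : String) (direction : String), Dom_getDirection currentPosition direction → Pre_getDirection currentPosition direction → Spec_getDirection currentPosition direction (getDirection currentPosition direction)

-- ===== LEMMAS AND PROOFS =====

-- ===== VERDICT (by name: the statement is the Claim_ definition above) =====
theorem getDirection_spec : Claim_equal_getDirection := by
  intro cp dir _ pre
  obtain ⟨hlen, hall⟩ := pre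
  unfold Spec_getDirection getDirection getDirection_alt
  cases hps : (PySem.Str.split? cp ",").getD [] with
  | nil => simp [hps] at hlen
  | cons a t =>
    cases t with
    | nil => simp [hps] at hlen
    | cons b t2 =>
      cases t2 with
      | cons c t3 => simp [hps] at hlen
      | nil =>
        rw [hps] at hall
        have ha := hall a (by simp)
        have hb := hall b (by simp)
        cases hA : PySem.Int.ofStr? a with
        | none => rw [hA] at ha; simp at ha
        | some y =>
          cases hB : PySem.Int.ofStr? b with
          | none => rw [hB] at hb; simp at hb
          | some x =>
            simp only [pvParse2, hps, hA, hB]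
            by_cases h1 : dir = "up"
            · subst h1; simp [hA, hB, pvCompass, List.idxOf?, List.findIdx?, List.findIdx?.go, List.range_succ, List.range_zero, List.foldl, sub_eq_add_neg]
            by_cases h2 : dir = "right"
            · subst h2; simp [hA, hB, pvCompass, List.idxOf?, List.findIdx?, List.findIdx?.go, List.range_succ, List.range_zero, List.foldl]
            by_cases h3 : dir = "down"
            · subst h3; simp [hA, hB, pvCompass, List.idxOf?, List.findIdx?, List.findIdx?.go, List.range_succ, List.range_zero, List.foldl]
            by_cases h4 : dir = "left"
            · subst h4; simp [hA, hB, pvCompass, List.idxOf?, List.findIdx?, List.findIdx?.go, List.range_succ, List.range_zero, List.foldl, sub_eq_add_neg]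
            · have hn : pvCompass.contains dir = false := by
                simp [pvCompass, h1, h2, h3, h4]
              simp [hA, hB, h1, h2, h3, h4, List.contains_eq_mem, pvCompass]
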